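-- pv_equiv track=rewrite | github.com/edjah/Euler | problems/101-200/p109.py | checkout
-- ===== SOURCE A (Python) =====
-- regions = list(range(1, 21)) + [25]
--
-- scores = [m * r for r in range(1, 21) for m in range(1, 4)] + [25, 50]
--
-- def checkout(score, idx=0, remaining=3):
--     if remaining <= 0 or score <= 1:
--         return 0
--
--     tot = 0
--     for r in regions:
--         if 2 * r == score:
--             tot += 1
--
--     if remaining > 1:
--         for i in range(idx, len(scores)):
--             tot += checkout(score - scores[i], i, remaining - 1)
--
--     return tot
-- ===== SOURCE B (Python) =====
-- regions = list(range(1, 21)) + [25]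
--
-- scores = [m * r for r in range(1, 21) for m in range(1, 4)] + [25, 50]
--
-- DOUBLES = {2 * r for r in regions}
--
-- def checkout(score, idx=0, remaining=3):
--     # Level-by-level worklist instead of recursion: the frontier holds the
--     # (score, idx) states reachable with the current number of darts left.
--     total = 0
--     frontier = [(score, idx)]
--     while remaining > 0 and frontier:
--         new = []
--         for (s, i) in frontier:
--             if s <= 1:
--                 continue
--             if s in DOUBLES:
--                 total += 1
--             if remaining > 1:
--                 for j in range(i, len(scores)):
--                     new.append((s - scores[j], j))
--         frontier = new
--         remaining -= 1
--     return total
-- ===== Notes on version B (the rewrite author's own statement) =====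
-- stated objective: alternative
-- what changed: Replaces the 3-level recursion with an iterative level-by-level worklist (a frontier of (score,idx) states per darts-remaining level) and replaces the scan over the 21 regions with a membership test in a precomputed set of double values.
import Mathlib
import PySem

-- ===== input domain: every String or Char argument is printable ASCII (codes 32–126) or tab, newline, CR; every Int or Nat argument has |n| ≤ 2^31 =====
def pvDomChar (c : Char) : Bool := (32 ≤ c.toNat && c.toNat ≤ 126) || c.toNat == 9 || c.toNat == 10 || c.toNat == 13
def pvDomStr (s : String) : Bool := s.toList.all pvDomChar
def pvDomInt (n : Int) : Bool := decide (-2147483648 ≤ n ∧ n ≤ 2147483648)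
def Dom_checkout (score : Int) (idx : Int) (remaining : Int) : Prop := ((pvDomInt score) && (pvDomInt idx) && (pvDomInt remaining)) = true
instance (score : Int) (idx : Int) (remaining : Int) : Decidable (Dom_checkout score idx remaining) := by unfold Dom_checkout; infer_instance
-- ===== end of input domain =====

-- B replaces the recursion by a level-by-level worklist (frontier of states per
-- darts-remaining level) and a set-membership test for the finishing double;
-- objective: alternative decomposition, same cost.

-- ===== PORT A =====
def regionsA : List Int := [1,2,3,4,5,6,7,8,9,10,11,12,13,14,15,16,17,18,19,20,25]

def scoresA : List Int :=
  [1, 2, 3, 2, 4, 6, 3, 6, 9, 4, 8, 12, 5, 10, 15, 6, 12, 18, 7, 14, 21,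
   8, 16, 24, 9, 18, 27, 10, 20, 30, 11, 22, 33, 12, 24, 36, 13, 26, 39,
   14, 28, 42, 15, 30, 45, 16, 32, 48, 17, 34, 51, 18, 36, 54, 19, 38, 57,
   20, 40, 60, 25, 50]

-- literal port of A's recursion; scores[i] is pyGet? (negative wraparound;
-- the default 0 is only taken where Python raises IndexError, outside Pre_)
def checkout (score : Int) (idx : Int) (remaining : Int) : Int :=
  if remaining ≤ 0 ∨ score ≤ 1 then 0
  else
    let tot := regionsA.foldl (fun t r => if 2 * r = score then t + 1 else t) 0
    if remaining > 1 then
      (PySem.List.pyRange idx 62 1).foldl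
        (fun t i => t + checkout (score - (PySem.List.pyGet? scoresA i).getD 0) i (remaining - 1))
        tot
    else tot
termination_by remaining.toNat
decreasing_by omega

-- ===== PORT B =====
def doublesB : List Int := [2,4,6,8,10,12,14,16,18,20,22,24,26,28,30,32,34,36,38,40,50]

-- the states pushed for one frontier entry: (s - scores[j], j) for j in range(i, 62)
def childrenB (s : Int) (i : Int) : List (Int × Int) :=
  (PySem.List.pyRange i 62 1).map (fun j => (s - (PySem.List.pyGet? scoresA j).getD 0, j))

-- one frontier entry processed: state = (new frontier being built, running total)
def stepB (remaining : Int) (st : List (Int × Int) × Int) (p : Int × Int) : List (Int × Int) × Int :=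
  if p.1 ≤ 1 then st
  else
    let t := st.2 + (if p.1 ∈ doublesB then 1 else 0)
    if remaining > 1 then (st.1 ++ childrenB p.1 p.2, t) else (st.1, t)

def loopB (frontier : List (Int × Int)) (remaining : Int) (total : Int) : Int :=
  if remaining > 0 ∧ frontier ≠ [] then
    let st := frontier.foldl (stepB remaining) ([], total)
    loopB st.1 (remaining - 1) st.2
  else total
termination_by remaining.toNat
decreasing_by omega

def checkout_alt (score : Int) (idx : Int) (remaining : Int) : Int :=
  loopB [(score, idx)] remaining 0

-- ===== PRECONDITION & SPEC =====
-- Pre_ excludes exactly the inputs where Python A raises: IndexError when a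
-- live recursion step (remaining > 1, score > 1) has idx below -len(scores)
-- (B raises there too), and RecursionError when both remaining and score
-- approach CPython's ~1000-frame recursion limit with a live recursion
-- (idx < 62): there A's depth-first recursion overflows the stack (and just
-- below the limit its exponential recursion cannot return either).
def Pre_checkout (score : Int) (idx : Int) (remaining : Int) : Prop :=
  remaining ≤ 1 ∨ score ≤ 1 ∨ (-62 ≤ idx ∧ (remaining ≤ 900 ∨ score ≤ 900 ∨ 62 ≤ idx))
instance (score : Int) (idx : Int) (remaining : Int) : Decidable (Pre_checkout score idx remaining) := by unfold Pre_checkout; infer_instance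

def pvWitness_checkout : Int × Int × Int := (170, 0, 3)

def Spec_checkout (score : Int) (idx : Int) (remaining : Int) (out : Int) : Prop := out = checkout_alt score idx remaining
instance (score : Int) (idx : Int) (remaining : Int) (out : Int) : Decidable (Spec_checkout score idx remaining out) := by unfold Spec_checkout; infer_instance

-- ===== CLAIM (what is proved, stated in full; the proofs are below) =====
def Claim_equal_checkout : Prop := ∀ (score : Int) (idx : Int) (remaining : Int), Dom_checkout score idx remaining → Pre_checkout score idx remaining → Spec_checkout score idx remaining (checkout score idx remaining)

-- ===== LEMMAS AND PROOFS =====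

-- A's region-scan count of finishing doubles equals B's membership test
lemma count_nodup (l : List Int) (s : Int) (hl : l.Nodup) :
    ∀ acc : Int, l.foldl (fun t r => if 2 * r = s then t + 1 else t) acc
      = acc + (if s ∈ l.map (fun r => 2 * r) then 1 else 0) := by
  induction l with
  | nil => intro acc; simp
  | cons a l ih =>
    intro acc
    rcases List.nodup_cons.mp hl with ⟨ha, hl'⟩
    rw [List.foldl_cons, ih hl']
    by_cases h : 2 * a = s
    · have hnot : s ∉ l.map (fun r => 2 * r) := by
        intro hmem
        rcases List.mem_map.mp hmem with ⟨r, hr, hrs⟩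
        have : r = a := by omega
        exact ha (this ▸ hr)
      simp [h, hnot]
    · simp [List.mem_map, h, show ¬ s = 2 * a from by omega]

lemma region_count (s acc : Int) :
    regionsA.foldl (fun t r => if 2 * r = s then t + 1 else t) acc
      = acc + (if s ∈ doublesB then 1 else 0) := by
  have hmap : regionsA.map (fun r => 2 * r) = doublesB := by decide
  rw [count_nodup regionsA s (by decide) acc, hmap]

-- sum of A's values over a frontier
def sumC (l : List (Int × Int)) (r : Int) : Int :=
  (l.map (fun p => checkout p.1 p.2 r)).sum

-- one unfolding of A, phrased through childrenB
lemma checkout_unfold (s i r : Int) (hr : 0 < r) :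
    checkout s i r =
      if s ≤ 1 then 0
      else (if s ∈ doublesB then 1 else 0) +
        (if r > 1 then sumC (childrenB s i) (r - 1) else 0) := by
  rw [checkout]
  by_cases hs : s ≤ 1
  · simp [hs, show ¬(r ≤ 0) from by omega]
  · have hcond : ¬(r ≤ 0 ∨ s ≤ 1) := by omega
    rw [if_neg hcond, if_neg hs]
    rw [region_count s 0, zero_add]
    by_cases hr1 : r > 1
    · rw [if_pos hr1, if_pos hr1, PySem.List.foldl_add]
      congr 1
      unfold sumC childrenB
      rw [List.map_map]
      rfl
    · rw [if_neg hr1, if_neg hr1, add_zero]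

-- invariant of one frontier pass
lemma fold_invariant (r : Int) (hr : 0 < r) (frontier : List (Int × Int)) :
    ∀ (new : List (Int × Int)) (total : Int),
      (frontier.foldl (stepB r) (new, total)).2
        + sumC (frontier.foldl (stepB r) (new, total)).1 (r - 1)
      = total + sumC new (r - 1) + sumC frontier r := by
  induction frontier with
  | nil => intro new total; simp [sumC]
  | cons p f ih =>
    intro new total
    rw [List.foldl_cons]
    have hck := checkout_unfold p.1 p.2 r hr
    have hsum : sumC (p :: f) r = checkout p.1 p.2 r + sumC f r := by
      simp [sumC]
    by_cases hp : p.1 ≤ 1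
    · have hstep : stepB r (new, total) p = (new, total) := by
        simp [stepB, hp]
      rw [hstep, ih, hsum, hck]
      simp [hp]
    · by_cases hr1 : r > 1
      · have hstep : stepB r (new, total) p
            = (new ++ childrenB p.1 p.2, total + (if p.1 ∈ doublesB then 1 else 0)) := by
          simp [stepB, hp, hr1]
        rw [hstep, ih, hsum, hck]
        have happ : sumC (new ++ childrenB p.1 p.2) (r - 1)
            = sumC new (r - 1) + sumC (childrenB p.1 p.2) (r - 1) := by
          simp [sumC]
        rw [happ]
        simp [hp, hr1]
        ring
      · have hstep : stepB r (new, total) p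
            = (new, total + (if p.1 ∈ doublesB then 1 else 0)) := by
          simp [stepB, hp, hr1]
        rw [hstep, ih, hsum, hck]
        simp [hp, hr1]
        ring

-- main invariant of the level loop
lemma loopB_eq (n : Nat) : ∀ (r : Int), r.toNat ≤ n →
    ∀ (frontier : List (Int × Int)) (total : Int),
      loopB frontier r total = total + sumC frontier r := by
  induction n with
  | zero =>
    intro r hrn frontier total
    have hr : r ≤ 0 := by omega
    rw [loopB]
    have : ¬(r > 0 ∧ frontier ≠ []) := by
      rintro ⟨h1, _⟩; omega
    simp only [this, if_false]
    have hz : sumC frontier r = 0 := by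
      unfold sumC
      apply List.sum_eq_zero
      intro x hx
      rcases List.mem_map.mp hx with ⟨p, _, hpx⟩
      rw [← hpx, checkout]
      simp [hr]
    rw [hz]; ring
  | succ n ih =>
    intro r hrn frontier total
    rw [loopB]
    by_cases hc : r > 0 ∧ frontier ≠ []
    · rw [if_pos hc]
      rw [ih (r - 1) (by omega)]
      rw [fold_invariant r hc.1 frontier [] total]
      have hnil : sumC [] (r - 1) = 0 := by simp [sumC]
      rw [hnil, add_zero]
    · simp only [hc, if_false]
      by_cases hr : r > 0
      · have hf : frontier = [] := by
          by_contra h; exact hc ⟨hr, h⟩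
        simp [hf, sumC]
      · have hz : sumC frontier r = 0 := by
          unfold sumC
          apply List.sum_eq_zero
          intro x hx
          rcases List.mem_map.mp hx with ⟨p, _, hpx⟩
          rw [← hpx, checkout]
          simp [show r ≤ 0 from by omega]
        rw [hz]; ring

-- ===== VERDICT (by name: the statement is the Claim_ definition above) =====
theorem checkout_spec : Claim_equal_checkout := by
  intro score idx remaining _ _
  unfold Spec_checkout checkout_alt
  rw [loopB_eq remaining.toNat remaining le_rfl]
  simp [sumC]
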